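-- pv_equiv track=rewrite | github.com/tomo2515x/python1-2022 | src/algo/z8/solution2.py | construct_word
-- ===== SOURCE A (Python) =====
-- def construct_word(syllables: set[str], word: str) -> bool:
--     syllist = []
--     for syllable in range(len(word)):
--
--         if syllable+1 < len(word):
--             syllist.append(word[syllable]+word[syllable+1])
--
--     if set(syllist) & syllables == set(syllist):
--         return True
--     return False
-- ===== SOURCE B (Python) =====
-- def construct_word(syllables: set[str], word: str) -> bool:
--     # Index the length-2 syllables by first character: nxt[c] = set of allowed successors.
--     nxt = {}
--     for s in syllables:
--         if len(s) == 2: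
--             nxt.setdefault(s[0], set()).add(s[1])
--     # Single scan over the characters, remembering only the previous character;
--     # no bigram strings are ever built, and we stop at the first bad pair.
--     prev = None
--     for c in word:
--         if prev is not None and c not in nxt.get(prev, set()):
--             return False
--         prev = c
--     return True
-- ===== Notes on version B (the rewrite author's own statement) =====
-- stated objective: alternative
-- what changed: B builds a character-indexed successor dict from syllables (nxt[c] = allowed next characters of the length-2 syllables) and then makes one prev/cur scan over the word looking up each successor, constructing no bigram strings and no bigram set, whereas A materializes the list of all bigram strings and tests set(bigrams) & syllables == set(bigrams).
import Mathlib
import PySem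

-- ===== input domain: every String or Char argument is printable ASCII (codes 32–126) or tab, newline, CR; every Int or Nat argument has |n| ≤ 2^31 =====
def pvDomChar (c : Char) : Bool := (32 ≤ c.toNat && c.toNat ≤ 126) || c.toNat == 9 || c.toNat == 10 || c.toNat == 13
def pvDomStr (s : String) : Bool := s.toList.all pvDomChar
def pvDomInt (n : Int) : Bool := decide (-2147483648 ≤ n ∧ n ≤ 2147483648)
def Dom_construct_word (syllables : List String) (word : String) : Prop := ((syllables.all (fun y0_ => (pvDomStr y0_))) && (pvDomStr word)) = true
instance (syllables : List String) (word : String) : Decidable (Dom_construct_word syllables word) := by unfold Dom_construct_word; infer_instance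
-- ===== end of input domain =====

-- B replaces A's bigram-list + set-intersection-equality test by a successor index built from
-- the length-2 syllables (a dict Char -> Set Char) followed by one prev/cur scan of the word
-- that builds no bigram strings (objective: alternative).

-- ===== PORT A =====
-- word[i] (in range here) is a 1-char string; word[i]+word[i+1] is ported as String.ofList of the
-- two chars (exact: ASCII concatenation of the two characters).
def construct_word (syllables : List String) (word : String) : Bool :=
  let cs := word.toList
  let n : Int := cs.length
  let syllist : List String :=
    (PySem.List.pyRange 0 n 1).foldl
      (fun acc syllable =>
        if syllable + 1 < n then
          acc ++ [String.ofList [PySem.List.pyGetD cs syllable ' ', PySem.List.pyGetD cs (syllable + 1) ' ']]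
        else acc) []
  if PySem.Set.equal (PySem.Set.inter (PySem.Set.ofList syllist) syllables) (PySem.Set.ofList syllist) then
    true
  else
    false

-- ===== PORT B =====
-- Source B's first loop: nxt.setdefault(s[0], set()).add(s[1]) sets nxt[s[0]] = nxt.get(s[0], set()) ∪ {s[1]},
-- which is exactly Dict.modify; the 1-char Python strings s[0]/s[1] are ported as the chars of s
-- (exact: len(s) == 2 guarantees both indexings are in range).
def pvNext (syllables : List String) : PySem.Dict Char (PySem.Set Char) :=
  syllables.foldl
    (fun d s =>
      if PySem.Str.len s == 2 then
        d.modify (s.toList.getD 0 ' ') PySem.Set.empty (fun st => st.add (s.toList.getD 1 ' '))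
      else d)
    PySem.Dict.empty

-- Source B's second loop ('prev = None; for c in word: … return False … prev = c'): the early return
-- makes it the structural recursion below over the word's characters with the prev state.
def pvScan (nxt : PySem.Dict Char (PySem.Set Char)) (prev : Option Char) : List Char → Bool
  | [] => true
  | c :: rest =>
    match prev with
    | some p =>
      if ¬ PySem.Set.contains (nxt.getD p PySem.Set.empty) c then false
      else pvScan nxt (some c) rest
    | none => pvScan nxt (some c) rest

def construct_word_alt (syllables : List String) (word : String) : Bool :=
  pvScan (pvNext syllables) none word.toList

-- ===== PRECONDITION & SPEC =====
def Spec_construct_word (syllables : List String) (word : String) (out : Bool) : Prop := out = construct_word_alt syllables word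
instance (syllables : List String) (word : String) (out : Bool) : Decidable (Spec_construct_word syllables word out) := by unfold Spec_construct_word; infer_instance

-- ===== CLAIM (what is proved, stated in full; the proofs are below) =====
def Claim_equal_construct_word : Prop := ∀ (syllables : List String) (word : String), Dom_construct_word syllables word → Spec_construct_word syllables word (construct_word syllables word)

-- ===== LEMMAS AND PROOFS =====

-- the index filter in A keeps exactly range (n-1)
lemma pv_filter_range (n : Nat) :
    (List.range n).filter (fun (k : Nat) => decide ((k : Int) + 1 < (n : Int))) = List.range (n - 1) := by
  cases n with
  | zero => simp
  | succ m =>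
    rw [List.range_succ, List.filter_append]
    have h1 : (List.range m).filter (fun (k : Nat) => decide ((k : Int) + 1 < ((m + 1 : Nat) : Int))) = List.range m := by
      apply List.filter_eq_self.2
      intro a ha
      simp only [List.mem_range] at ha
      simp only [decide_eq_true_eq]
      push_cast; omega
    have h2 : ([m].filter (fun (k : Nat) => decide ((k : Int) + 1 < ((m + 1 : Nat) : Int)))) = [] := by
      simp
    rw [h1, h2]
    simp

-- the bigram pairs indexed over range (n-1) are exactly zip cs cs.tail
lemma pv_pairs_eq_zip (cs : List Char) :
    (List.range (cs.length - 1)).map (fun k => (cs.getD k ' ', cs.getD (k + 1) ' '))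
      = cs.zip cs.tail := by
  apply List.ext_getElem
  · simp only [List.length_map, List.length_range, List.length_zip, List.length_tail]
    omega
  · intro i h1 h2
    have hlen : i < cs.length - 1 := by simpa using h1
    have hi : i < cs.length := by omega
    have hi1 : i + 1 < cs.length := by omega
    have hti : i < cs.tail.length := by simp [List.length_tail]; omega
    simp [List.getElem_zip, List.getElem_tail, List.getD_eq_getElem?_getD,
      List.getElem?_eq_getElem hi, List.getElem?_eq_getElem hi1]

-- A's syllist is the mapped bigram list
lemma pv_syllist_eq (cs : List Char) :
    ((PySem.List.pyRange 0 (cs.length : Int) 1).foldl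
      (fun acc syllable =>
        if syllable + 1 < (cs.length : Int) then
          acc ++ [String.ofList [PySem.List.pyGetD cs syllable ' ', PySem.List.pyGetD cs (syllable + 1) ' ']]
        else acc) [])
      = (cs.zip cs.tail).map (fun p => String.ofList [p.1, p.2]) := by
  have hfun : (fun (acc : List String) (syllable : Int) =>
        if syllable + 1 < (cs.length : Int) then
          acc ++ [String.ofList [PySem.List.pyGetD cs syllable ' ', PySem.List.pyGetD cs (syllable + 1) ' ']]
        else acc)
      = (fun acc syllable =>
        if (fun s : Int => decide (s + 1 < (cs.length : Int))) syllable = true then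
          acc ++ [String.ofList [PySem.List.pyGetD cs syllable ' ', PySem.List.pyGetD cs (syllable + 1) ' ']]
        else acc) := by
    funext acc s
    by_cases h : s + 1 < (cs.length : Int) <;> simp [h]
  rw [hfun, PySem.List.foldl_append_if, PySem.List.pyRange_one]
  simp only [Int.sub_zero, Int.toNat_natCast, List.filter_map, List.map_map]
  have hpred : ((List.range cs.length).filter
        ((fun s : Int => decide (s + 1 < (cs.length : Int))) ∘ (fun k : Nat => (0 : Int) + k)))
      = (List.range cs.length).filter (fun (k : Nat) => decide ((k : Int) + 1 < (cs.length : Int))) := by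
    apply List.filter_congr; intro a _; simp
  rw [hpred, pv_filter_range]
  rw [← pv_pairs_eq_zip, List.map_map]
  apply List.map_congr_left
  intro k hk
  simp only [List.mem_range] at hk
  simp only [Function.comp_apply]
  have e1 : (0 : Int) + (k : Nat) = ((k : Nat) : Int) := by omega
  rw [e1]
  have e2 : ((k : Nat) : Int) + 1 = (((k + 1 : Nat)) : Int) := by omega
  rw [e2, PySem.List.pyGetD_natCast, PySem.List.pyGetD_natCast]

-- A's set-intersection condition is element-wise membership of the list
lemma pv_setcond_key (L : List String) (syllables : List String) :
    PySem.Set.equal (PySem.Set.inter (PySem.Set.ofList L) syllables) (PySem.Set.ofList L) = true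
      ↔ ∀ x ∈ L, x ∈ syllables := by
  rw [PySem.Set.equal_iff]
  constructor
  · intro h x hx
    exact ((PySem.Set.mem_inter _ _ _).1 ((h x).2 ((PySem.Set.mem_ofList _ _).2 hx))).2
  · intro h x
    rw [PySem.Set.mem_inter, PySem.Set.mem_ofList]
    constructor
    · rintro ⟨hx, _⟩; exact hx
    · intro hx; exact ⟨hx, h x hx⟩

lemma pv_setcond_iff (L : List String) (syllables : List String) :
    ((if PySem.Set.equal (PySem.Set.inter (PySem.Set.ofList L) syllables) (PySem.Set.ofList L) = true then
        true else false) = true)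
      ↔ ∀ x ∈ L, x ∈ syllables := by
  by_cases hc : PySem.Set.equal (PySem.Set.inter (PySem.Set.ofList L) syllables) (PySem.Set.ofList L) = true
  · simp only [if_pos hc, true_iff]
    exact (pv_setcond_key L syllables).1 hc
  · simp only [if_neg hc]
    constructor
    · intro h; exact absurd h (by simp)
    · intro h; exact absurd ((pv_setcond_key L syllables).2 h) hc

-- membership in B's successor index = membership of the bigram string in syllables
lemma pv_next_mem (l : List String) (d : PySem.Dict Char (PySem.Set Char)) (a b : Char) :
    (b ∈ (l.foldl
        (fun d s =>
          if PySem.Str.len s == 2 then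
            d.modify (s.toList.getD 0 ' ') PySem.Set.empty (fun st => st.add (s.toList.getD 1 ' '))
          else d) d).getD a PySem.Set.empty)
      ↔ b ∈ d.getD a PySem.Set.empty ∨ String.ofList [a, b] ∈ l := by
  induction l generalizing d with
  | nil => simp
  | cons s rest ih =>
    simp only [List.foldl_cons, List.mem_cons]
    rw [ih]
    have hstep : (b ∈ ((if PySem.Str.len s == 2 then
            d.modify (s.toList.getD 0 ' ') PySem.Set.empty (fun st => st.add (s.toList.getD 1 ' '))
          else d)).getD a PySem.Set.empty)
        ↔ b ∈ d.getD a PySem.Set.empty ∨ String.ofList [a, b] = s := by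
      by_cases h2 : PySem.Str.len s == 2
      · have hlen : s.toList.length = 2 := by
          have := PySem.Str.len_eq s
          simp only [beq_iff_eq] at h2
          omega
        obtain ⟨c0, c1, hcl⟩ : ∃ c0 c1, s.toList = [c0, c1] := by
          match hc : s.toList, hlen with
          | [c0, c1], _ => exact ⟨c0, c1, rfl⟩
        simp only [if_pos h2, hcl, List.getD_cons_zero, List.getD_cons_succ]
        rw [PySem.Dict.getD_modify]
        have hs : (String.ofList [a, b] = s) ↔ (a = c0 ∧ b = c1) := by
          rw [String.ofList_eq, hcl]
          constructor
          · intro h; injection h with h1 h2'; injection h2' with h2' _; exact ⟨h1, h2'⟩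
          · rintro ⟨rfl, rfl⟩; rfl
        by_cases ha : a = c0
        · subst ha
          simp [PySem.Set.mem_add, hs]
        · simp [if_neg ha, hs]
          tauto
      · simp only [if_neg h2]
        have hne : String.ofList [a, b] ≠ s := by
          intro h
          rw [String.ofList_eq] at h
          have := PySem.Str.len_eq s
          rw [← h] at this
          simp only [List.length_cons, List.length_nil] at this
          simp only [beq_iff_eq] at h2
          omega
        tauto
    rw [hstep]
    tauto

-- B's scan with prev = some p is the all-zip over the pairs starting at p
lemma pv_scan_some (nxt : PySem.Dict Char (PySem.Set Char)) (cs : List Char) (p : Char) :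
    pvScan nxt (some p) cs
      = ((p :: cs).zip cs).all (fun q => PySem.Set.contains (nxt.getD q.1 PySem.Set.empty) q.2) := by
  induction cs generalizing p with
  | nil => rfl
  | cons c rest ih =>
    simp only [pvScan, List.zip_cons_cons, List.all_cons, ih c]
    by_cases h : PySem.Set.contains (nxt.getD p PySem.Set.empty) c = true
    · rw [h]; simp
    · rw [Bool.eq_false_iff.2 h]; simp

-- B's scan from None is the all-zip over adjacent pairs
lemma pv_scan_none (nxt : PySem.Dict Char (PySem.Set Char)) (cs : List Char) :
    pvScan nxt none cs
      = (cs.zip cs.tail).all (fun q => PySem.Set.contains (nxt.getD q.1 PySem.Set.empty) q.2) := by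
  cases cs with
  | nil => rfl
  | cons c rest => simp only [pvScan, List.tail_cons, pv_scan_some]

-- each pair's lookup in B's index equals A's bigram membership test
lemma pv_lookup_eq (syllables : List String) (a b : Char) :
    PySem.Set.contains ((pvNext syllables).getD a PySem.Set.empty) b
      = PySem.Set.contains syllables (String.ofList [a, b]) := by
  apply Bool.eq_iff_iff.mpr
  rw [PySem.Set.contains_iff, PySem.Set.contains_iff]
  unfold pvNext
  rw [pv_next_mem]
  simp [PySem.Dict.getD_empty, PySem.Set.empty]

-- ===== VERDICT (by name: the statement is the Claim_ definition above) =====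
theorem construct_word_spec : Claim_equal_construct_word := by
  intro syllables word _
  unfold Spec_construct_word construct_word construct_word_alt
  simp only [pv_scan_none, pv_syllist_eq]
  apply Bool.eq_iff_iff.mpr
  rw [pv_setcond_iff, List.all_eq_true]
  constructor
  · intro h p hp
    rw [pv_lookup_eq, PySem.Set.contains_iff]
    exact h (String.ofList [p.1, p.2]) (List.mem_map_of_mem hp)
  · intro h x hx
    rcases List.mem_map.1 hx with ⟨p, hp, rfl⟩
    have := h p hp
    rw [pv_lookup_eq, PySem.Set.contains_iff] at this
    exact this
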